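-- pv_equiv track=rewrite | github.com/riteshkukreja/Search-Engine | SpellChecker.py | editsN
-- ===== SOURCE A (Python) =====
-- def edits1(word):
--     "All edits that are one edit away from `word`."
--     letters    = 'abcdefghijklmnopqrstuvwxyz'
--     splits     = [(word[:i], word[i:])    for i in range(len(word) + 1)]
--     deletes    = [L + R[1:]               for L, R in splits if R]
--     transposes = [L + R[1] + R[0] + R[2:] for L, R in splits if len(R)>1]
--     replaces   = [L + c + R[1:]           for L, R in splits if R for c in letters]
--     inserts    = [L + c + R               for L, R in splits for c in letters]
--     return set(deletes + transposes + replaces + inserts)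
--
-- def editsN(word, N):
--     "All edits that are N edits away from `word`."
--     L = edits1(word)
--     if(N == 1):
--         return L
--
--     for i in range(N-1):
--         H = (e2 for e1 in L for e2 in edits1(e1))
--         L = H
--
--     return L
-- ===== SOURCE B (Python) =====
-- def edits1(word):
--     "All edits that are one edit away from `word`."
--     letters = 'abcdefghijklmnopqrstuvwxyz'
--     n = len(word)
--     deletes    = [word[:i] + word[i+1:]                       for i in range(n)]
--     transposes = [word[:i] + word[i+1] + word[i] + word[i+2:] for i in range(n - 1)]
--     replaces   = [word[:i] + c + word[i+1:]                   for i in range(n) for c in letters]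
--     inserts    = [word[:i] + c + word[i:]                     for i in range(n + 1) for c in letters]
--     return set(deletes + transposes + replaces + inserts)
--
-- def editsN(word, N):
--     "All edits that are N edits away from `word`."
--     if N <= 1:
--         return edits1(word)
--     return (e2 for e1 in editsN(word, N - 1) for e2 in edits1(e1))
-- ===== Notes on version B (the rewrite author's own statement) =====
-- stated objective: simpler
-- what changed: B drops A's intermediate splits list and its filtered comprehensions (edit lists are built by indexing and slicing the word directly over plain index ranges) and replaces A's iterative loop that rebinds L to a chained generator N-1 times (plus a special-cased N==1 return) with a direct recursion on N: base case N<=1 returns edits1(word), otherwise one generator over editsN(word, N-1).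
import Mathlib
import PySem

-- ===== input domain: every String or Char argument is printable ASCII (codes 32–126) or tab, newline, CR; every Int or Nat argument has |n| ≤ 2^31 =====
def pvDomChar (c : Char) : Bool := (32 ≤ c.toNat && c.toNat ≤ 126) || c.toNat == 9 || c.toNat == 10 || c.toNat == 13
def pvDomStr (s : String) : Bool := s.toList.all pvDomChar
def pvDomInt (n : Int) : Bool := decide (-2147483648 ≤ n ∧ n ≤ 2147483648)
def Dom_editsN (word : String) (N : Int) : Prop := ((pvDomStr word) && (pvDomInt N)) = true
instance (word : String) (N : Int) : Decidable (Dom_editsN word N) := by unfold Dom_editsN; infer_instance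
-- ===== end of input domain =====

-- B rewrites edits1 without the splits list (direct index ranges and slices, no filters)
-- and replaces A's iterative generator-chaining loop by direct recursion on N: simpler.
-- Equivalence is about the materialised sequence of the returned set/generator.

-- ===== PORT A =====
-- A's edits1: splits list, then four filtered comprehensions over it; sets of strings
-- are modelled as PySem.Set over List Char, rendered to String at the end
def edits1A (word : String) : List String :=
  let letters : List Char := "abcdefghijklmnopqrstuvwxyz".toList
  let w := word.toList
  let splits : List (List Char × List Char) :=
    (PySem.List.pyRange 0 ((w.length : Int) + 1) 1).map
      (fun i => (PySem.List.slice w none (some i), PySem.List.slice w (some i) none))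
  let deletes := (splits.filter (fun p => !p.2.isEmpty)).map
      (fun p => p.1 ++ PySem.List.slice p.2 (some 1) none)
  let transposes := (splits.filter (fun p => 1 < p.2.length)).map
      (fun p => p.1 ++ [PySem.List.pyGetD p.2 1 ' ', PySem.List.pyGetD p.2 0 ' ']
            ++ PySem.List.slice p.2 (some 2) none)
  let replaces := (splits.filter (fun p => !p.2.isEmpty)).flatMap
      (fun p => letters.map (fun c => p.1 ++ c :: PySem.List.slice p.2 (some 1) none))
  let inserts := splits.flatMap
      (fun p => letters.map (fun c => p.1 ++ c :: p.2))
  (PySem.Set.ofList (deletes ++ transposes ++ replaces ++ inserts)).map String.ofList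

def editsN (word : String) (N : Int) : List String :=
  let L := edits1A word
  if N == 1 then L
  else
    -- each loop iteration wraps L in one more generator level; materialised, that is one flatMap
    (PySem.List.pyRange 0 (N - 1) 1).foldl
      (fun L _ => L.flatMap (fun e1 => edits1A e1)) L

-- ===== PORT B =====
-- B's edits1: no splits list; each edit list is built by indexing/slicing word directly
-- (word[i] / word[i+1] are always in range on these index ranges, so pyGetD is exact)
def edits1B (word : String) : List String :=
  let letters : List Char := "abcdefghijklmnopqrstuvwxyz".toList
  let w := word.toList
  let n : Int := (w.length : Int)
  let deletes := (PySem.List.pyRange 0 n 1).map (fun i =>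
      PySem.List.slice w none (some i) ++ PySem.List.slice w (some (i + 1)) none)
  let transposes := (PySem.List.pyRange 0 (n - 1) 1).map (fun i =>
      PySem.List.slice w none (some i)
        ++ [PySem.List.pyGetD w (i + 1) ' ', PySem.List.pyGetD w i ' ']
        ++ PySem.List.slice w (some (i + 2)) none)
  let replaces := (PySem.List.pyRange 0 n 1).flatMap (fun i =>
      letters.map (fun c =>
        PySem.List.slice w none (some i) ++ c :: PySem.List.slice w (some (i + 1)) none))
  let inserts := (PySem.List.pyRange 0 (n + 1) 1).flatMap (fun i =>
      letters.map (fun c =>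
        PySem.List.slice w none (some i) ++ c :: PySem.List.slice w (some i) none))
  (PySem.Set.ofList (deletes ++ transposes ++ replaces ++ inserts)).map String.ofList

def editsN_alt (word : String) (N : Int) : List String :=
  if N ≤ 1 then edits1B word
  else (editsN_alt word (N - 1)).flatMap (fun e1 => edits1B e1)
termination_by N.toNat
decreasing_by omega

-- ===== PRECONDITION & SPEC =====
def Spec_editsN (word : String) (N : Int) (out : List String) : Prop := out = editsN_alt word N
instance (word : String) (N : Int) (out : List String) : Decidable (Spec_editsN word N out) := by unfold Spec_editsN; infer_instance

-- ===== CLAIM (what is proved, stated in full; the proofs are below) =====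
def Claim_equal_editsN : Prop := ∀ (word : String) (N : Int), Dom_editsN word N → Spec_editsN word N (editsN word N)

-- ===== LEMMAS AND PROOFS =====

-- filtering range(0, b) down to the indices below m
lemma filter_pyRange_lt (p : Int → Bool) (m b : Int) (h0 : 0 ≤ m) (hmb : m ≤ b)
    (hp : ∀ i, 0 ≤ i → i < b → (p i = true ↔ i < m)) :
    (PySem.List.pyRange 0 b 1).filter p = PySem.List.pyRange 0 m 1 := by
  rw [PySem.List.pyRange_one_append 0 m b h0 hmb, List.filter_append]
  have h1 : (PySem.List.pyRange 0 m 1).filter p = PySem.List.pyRange 0 m 1 := by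
    apply List.filter_eq_self.mpr
    intro i hi
    have := (PySem.List.mem_pyRange_one).mp hi
    exact (hp i this.1 (by omega)).mpr this.2
  have h2 : (PySem.List.pyRange m b 1).filter p = [] := by
    apply List.filter_eq_nil_iff.mpr
    intro i hi
    have := (PySem.List.mem_pyRange_one).mp hi
    simp only [Bool.not_eq_true]
    by_contra hc
    have := (hp i (by omega) this.2).mp (by revert hc; cases p i <;> simp)
    omega
  rw [h1, h2, List.append_nil]

lemma edits1_eq (word : String) : edits1A word = edits1B word := by
  unfold edits1A edits1B
  simp only []
  generalize word.toList = w
  have hn0 : (0:Int) ≤ (w.length : Int) := by positivity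
  -- filter/map over the splits list pushed to the index range
  have hfm : ∀ (p : List Char × List Char → Bool),
      ((PySem.List.pyRange 0 ((w.length : Int) + 1) 1).map
        (fun i => (PySem.List.slice w none (some i), PySem.List.slice w (some i) none))).filter p
      = ((PySem.List.pyRange 0 ((w.length : Int) + 1) 1).filter
          (fun i => p (PySem.List.slice w none (some i), PySem.List.slice w (some i) none))).map
        (fun i => (PySem.List.slice w none (some i), PySem.List.slice w (some i) none)) := by
    intro p; rw [List.filter_map]; rfl
  have hdrop : ∀ i : Int, 0 ≤ i → PySem.List.slice w (some i) none = w.drop i.toNat := by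
    intro i hi; exact PySem.List.slice_from w hi
  -- the nonempty-suffix filter keeps exactly the indices i < len(word)
  have hfilter1 : (PySem.List.pyRange 0 ((w.length : Int) + 1) 1).filter
      (fun i => !(PySem.List.slice w (some i) none).isEmpty) = PySem.List.pyRange 0 (w.length : Int) 1 := by
    apply filter_pyRange_lt _ (w.length : Int) ((w.length : Int) + 1) hn0 (by omega)
    intro i h0 hb
    rw [hdrop i h0]
    simp
    omega
  -- the length>1 filter keeps exactly the indices i < len(word) - 1
  have hfilter2 : (PySem.List.pyRange 0 ((w.length : Int) + 1) 1).filter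
      (fun i => decide (1 < (PySem.List.slice w (some i) none).length))
      = PySem.List.pyRange 0 ((w.length : Int) - 1) 1 := by
    by_cases hcase : 1 ≤ (w.length : Int)
    · apply filter_pyRange_lt _ ((w.length : Int) - 1) ((w.length : Int) + 1) (by omega) (by omega)
      intro i h0 hb
      rw [hdrop i h0]
      simp
      omega
    · have hwnil : w = [] := List.length_eq_zero_iff.mp (by omega)
      subst hwnil
      simp
      intro a h1 h2
      simp [PySem.List.slice]
  -- deletes/replaces tails agree
  have hdel : ∀ i : Int, 0 ≤ i → i < (w.length : Int) →
      PySem.List.slice (PySem.List.slice w (some i) none) (some 1) none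
        = PySem.List.slice w (some (i + 1)) none := by
    intro i h0 hlt
    rw [hdrop i h0, hdrop (i + 1) (by omega), PySem.List.slice_from _ (by omega : (0:Int) ≤ 1)]
    rw [List.drop_drop]
    congr 1
    omega
  -- transpose pieces agree
  have htr : ∀ i : Int, 0 ≤ i → i < (w.length : Int) - 1 →
      (PySem.List.pyGetD (PySem.List.slice w (some i) none) 1 ' '
          = PySem.List.pyGetD w (i + 1) ' '
        ∧ PySem.List.pyGetD (PySem.List.slice w (some i) none) 0 ' '
          = PySem.List.pyGetD w i ' '
        ∧ PySem.List.slice (PySem.List.slice w (some i) none) (some 2) none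
          = PySem.List.slice w (some (i + 2)) none) := by
    intro i h0 hlt
    rw [hdrop i h0]
    refine ⟨?_, ?_, ?_⟩
    · rw [PySem.List.pyGetD_of_nonneg _ _ (by omega : (0:Int) ≤ 1),
          PySem.List.pyGetD_of_nonneg _ _ (by omega : (0:Int) ≤ i + 1)]
      simp [List.getD, List.getElem?_drop, show (i + 1).toNat = i.toNat + 1 by omega]
    · rw [PySem.List.pyGetD_of_nonneg _ _ (by omega : (0:Int) ≤ 0),
          PySem.List.pyGetD_of_nonneg _ _ h0]
      simp [List.getD, List.getElem?_drop]
    · rw [hdrop (i + 2) (by omega), PySem.List.slice_from _ (by omega : (0:Int) ≤ 2)]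
      rw [List.drop_drop]
      congr 1
      omega
  refine congrArg _ (congrArg _ ?_)
  rw [hfm]
  rw [hfm]
  simp only []
  rw [hfilter1, hfilter2, List.map_map, List.map_map, List.flatMap_map, List.flatMap_map]
  congr 1
  congr 1
  · congr 1
    -- deletes
    · apply List.map_congr_left
      intro i hi
      have := (PySem.List.mem_pyRange_one).mp hi
      simp only [Function.comp]
      rw [hdel i this.1 this.2]
    -- transposes
    · apply List.map_congr_left
      intro i hi
      have := (PySem.List.mem_pyRange_one).mp hi
      obtain ⟨h1, h2, h3⟩ := htr i this.1 this.2
      simp only [Function.comp]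
      rw [h1, h2, h3]
  -- replaces
  · apply List.flatMap_congr
    intro i hi
    have := (PySem.List.mem_pyRange_one).mp hi
    simp only []
    rw [hdel i this.1 this.2]

-- A's value at N is one more flatMap over A's value at N-1, for N ≥ 2
lemma editsN_step (w : String) (N : Int) (h : 2 ≤ N) :
    editsN w N = (editsN w (N - 1)).flatMap (fun e1 => edits1A e1) := by
  unfold editsN
  simp only [beq_iff_eq]
  rw [if_neg (by omega : ¬ N = 1)]
  have hsplit : PySem.List.pyRange 0 (N - 1) 1
      = PySem.List.pyRange 0 (N - 2) 1 ++ [N - 2] := by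
    have := PySem.List.pyRange_one_succ_right (a := 0) (b := N - 2) (by omega)
    simpa [show N - 2 + 1 = N - 1 by ring] using this
  rw [hsplit, List.foldl_append]
  by_cases h2 : N - 1 = 1
  · rw [if_pos h2]
    rw [show N - 2 = 0 by omega, PySem.List.pyRange_one_eq_nil (by omega)]
    simp
  · rw [if_neg h2]
    rw [show N - 1 - 1 = N - 2 by ring]
    simp

theorem editsN_eq_alt (w : String) (N : Int) : editsN w N = editsN_alt w N := by
  have key : ∀ (n : Nat) (N : Int), N.toNat = n → editsN w N = editsN_alt w N := by
    intro n
    induction n using Nat.strong_induction_on with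
    | _ n ih =>
      intro N hn
      by_cases h : N ≤ 1
      · rw [editsN_alt, if_pos h, ← edits1_eq]
        unfold editsN
        simp only [beq_iff_eq]
        by_cases h1 : N = 1
        · rw [if_pos h1]
        · rw [if_neg h1, PySem.List.pyRange_one_eq_nil (by omega)]
          simp
      · rw [editsN_alt, if_neg h]
        rw [editsN_step w N (by omega), ih (N - 1).toNat (by omega) (N - 1) rfl]
        simp only [edits1_eq]
  exact key N.toNat N rfl

-- ===== VERDICT (by name: the statement is the Claim_ definition above) =====
theorem editsN_spec : Claim_equal_editsN := by
  intro w N _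
  unfold Spec_editsN
  exact editsN_eq_alt w N
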